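-- pv_equiv track=rewrite | github.com/Ryzhtus/master-thesis | named_entity_recognition/reader_document.py | convert_to_document
-- ===== SOURCE A (Python) =====
-- def convert_to_document(sentences, tags):
--     documents = []
--     documents_tags = []
--     document = []
--     document_tags = []
--
--     for sentence, tag in zip(sentences, tags):
--         if '-DOCSTART-' in sentence:
--             documents.append(document)
--             documents_tags.append(document_tags)
--             document = []
--             document_tags = []
--         else:
--             document.append(sentence)
--             document_tags.append(tag)
--
--     # append last document, because there is no '-DOCSTART-' or special end marker in text further
--     documents.append(document)
--     documents_tags.append(document_tags)
--
--     return documents, documents_tags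
-- ===== SOURCE B (Python) =====
-- def convert_to_document(sentences, tags):
--     pairs = list(zip(sentences, tags))
--     cuts = [i for i, (sentence, _) in enumerate(pairs) if '-DOCSTART-' in sentence]
--     bounds = [-1] + cuts + [len(pairs)]
--     segments = [pairs[lo + 1:hi] for lo, hi in zip(bounds, bounds[1:])]
--     documents = [[sentence for sentence, _ in seg] for seg in segments]
--     documents_tags = [[tag for _, tag in seg] for seg in segments]
--     return documents, documents_tags
-- ===== Notes on version B (the rewrite author's own statement) =====
-- stated objective: alternative
-- what changed: A carries four running accumulators (documents, documents_tags, document, document_tags) and flushes them at each marker; B instead zips once, collects the indices of '-DOCSTART-' markers, and takes the pair-slices strictly between consecutive cut points (virtual bounds -1 and len), unzipping each segment at the end.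
import Mathlib
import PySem

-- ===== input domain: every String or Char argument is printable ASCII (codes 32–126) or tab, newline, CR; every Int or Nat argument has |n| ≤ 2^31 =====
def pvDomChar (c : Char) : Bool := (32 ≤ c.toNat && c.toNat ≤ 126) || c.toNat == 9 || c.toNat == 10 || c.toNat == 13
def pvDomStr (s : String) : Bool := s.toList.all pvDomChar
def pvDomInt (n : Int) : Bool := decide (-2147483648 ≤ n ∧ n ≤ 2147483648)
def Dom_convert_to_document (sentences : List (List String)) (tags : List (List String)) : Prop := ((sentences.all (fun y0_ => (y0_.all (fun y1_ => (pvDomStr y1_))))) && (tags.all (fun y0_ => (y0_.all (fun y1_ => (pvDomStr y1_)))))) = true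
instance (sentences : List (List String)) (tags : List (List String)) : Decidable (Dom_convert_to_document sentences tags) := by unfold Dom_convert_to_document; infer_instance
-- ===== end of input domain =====

-- B replaces A's four running accumulators by marker-index cut points: it slices the
-- zipped pairs between consecutive DOCSTART indices (alternative decomposition, same cost).

-- ===== PORT A =====
-- fold state: (documents, documents_tags, document, document_tags)
def convert_to_document (sentences : List (List String)) (tags : List (List String)) : List (List (List String)) × List (List (List String)) :=
  let st := (sentences.zip tags).foldl
    (fun (st : List (List (List String)) × List (List (List String)) × List (List String) × List (List String)) p =>
      if "-DOCSTART-" ∈ p.1 then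
        (st.1 ++ [st.2.2.1], st.2.1 ++ [st.2.2.2], [], [])
      else
        (st.1, st.2.1, st.2.2.1 ++ [p.1], st.2.2.2 ++ [p.2]))
    ([], [], [], [])
  (st.1 ++ [st.2.2.1], st.2.1 ++ [st.2.2.2])

-- ===== PORT B =====
-- pairs = zip; cuts = marker indices; bounds = -1 :: cuts ++ [len]; documents = slices between bounds
def convert_to_document_alt (sentences : List (List String)) (tags : List (List String)) : List (List (List String)) × List (List (List String)) :=
  let pairs := sentences.zip tags
  let cuts := ((PySem.List.enumerate pairs).filter (fun ip => decide ("-DOCSTART-" ∈ ip.2.1))).map (fun ip => ip.1)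
  let bounds := (-1 : Int) :: (cuts ++ [(pairs.length : Int)])
  let segments := (bounds.zip bounds.tail).map (fun lh => PySem.List.slice pairs (some (lh.1 + 1)) (some lh.2))
  (segments.map (fun seg => seg.map (fun p => p.1)),
   segments.map (fun seg => seg.map (fun p => p.2)))

-- ===== PRECONDITION & SPEC =====
def Spec_convert_to_document (sentences : List (List String)) (tags : List (List String)) (out : List (List (List String)) × List (List (List String))) : Prop := out = convert_to_document_alt sentences tags
instance (sentences : List (List String)) (tags : List (List String)) (out : List (List (List String)) × List (List (List String))) : Decidable (Spec_convert_to_document sentences tags out) := by unfold Spec_convert_to_document; infer_instance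

-- ===== CLAIM (what is proved, stated in full; the proofs are below) =====
def Claim_equal_convert_to_document : Prop := ∀ (sentences : List (List String)) (tags : List (List String)), Dom_convert_to_document sentences tags → Spec_convert_to_document sentences tags (convert_to_document sentences tags)

-- ===== LEMMAS AND PROOFS =====

-- the common shape: segments of pairs strictly between marker elements (trailing segment always present)
def splitSegs (l : List (List String × List String)) : List (List (List String × List String)) :=
  match l with
  | [] => [[]]
  | p :: ps => if "-DOCSTART-" ∈ p.1 then [] :: splitSegs ps
               else (splitSegs ps).modifyHead (p :: ·)

-- chop l lo bs : the slices of l between consecutive bounds lo :: bs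
def chop (l : List (List String × List String)) (lo : Int) (bs : List Int) : List (List (List String × List String)) :=
  match bs with
  | [] => []
  | hi :: rest => PySem.List.slice l (some (lo + 1)) (some hi) :: chop l hi rest

theorem enumerate_shift {α : Type} (xs : List α) (s : Int) :
    PySem.List.enumerate xs (s+1) = (PySem.List.enumerate xs s).map (fun q => (q.1+1, q.2)) := by
  induction xs generalizing s with
  | nil => simp [PySem.List.enumerate_nil]
  | cons x xs ih => simp [PySem.List.enumerate_cons, ih (s+1)]

theorem slice_cons_shift {α : Type} (p : α) (ps : List α) (a b : Int) (ha : 0 ≤ a) (hb : 0 ≤ b) :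
    PySem.List.slice (p :: ps) (some (a+1)) (some (b+1)) = PySem.List.slice ps (some a) (some b) := by
  rw [PySem.List.slice_toNat _ (by omega) (by omega), PySem.List.slice_toNat _ ha hb]
  have h1 : (a+1).toNat = a.toNat + 1 := by omega
  have h2 : (b+1).toNat - (a.toNat+1) = b.toNat - a.toNat := by omega
  rw [h1, h2, List.drop_succ_cons]

theorem slice_zero_cons {α : Type} (p : α) (ps : List α) (b : Int) (hb : 0 ≤ b) :
    PySem.List.slice (p :: ps) (some 0) (some (b+1)) = p :: PySem.List.slice ps (some 0) (some b) := by
  rw [PySem.List.slice_toNat _ (by omega) (by omega), PySem.List.slice_toNat _ le_rfl hb]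
  have h1 : (b+1).toNat = b.toNat + 1 := by omega
  simp [h1]

theorem chop_shift (p : List String × List String) (ps : List (List String × List String))
    (lo : Int) (bs : List Int) (hlo : -1 ≤ lo) (hbs : ∀ x ∈ bs, 0 ≤ x) :
    chop (p :: ps) (lo + 1) (bs.map (· + 1)) = chop ps lo bs := by
  induction bs generalizing lo with
  | nil => simp [chop]
  | cons hi rest ih =>
    have h0 : (0:Int) ≤ hi := hbs hi (by simp)
    simp only [List.map_cons, chop]
    rw [slice_cons_shift _ _ _ _ (by omega) (by omega),
        ih hi (by omega) (fun x hx => hbs x (by simp [hx]))]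

theorem cuts_nonneg (l : List (List String × List String)) :
    ∀ x ∈ ((PySem.List.enumerate l 0).filter (fun ip => decide ("-DOCSTART-" ∈ ip.2.1))).map (fun ip => ip.1), 0 ≤ x := by
  intro x hx
  simp only [List.mem_map, List.mem_filter] at hx
  obtain ⟨ip, ⟨hmem, _⟩, rfl⟩ := hx
  rw [PySem.List.mem_enumerate_iff] at hmem
  obtain ⟨k, hk, rfl⟩ := hmem
  simp

theorem chop_eq_splitSegs (l : List (List String × List String)) :
    chop l (-1) ((((PySem.List.enumerate l 0).filter (fun ip => decide ("-DOCSTART-" ∈ ip.2.1))).map (fun ip => ip.1)) ++ [(l.length : Int)]) = splitSegs l := by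
  induction l with
  | nil =>
    have h0 : PySem.List.slice ([] : List (List String × List String)) (some (-1+1)) (some 0) = [] := by
      rw [PySem.List.slice_toNat _ (by omega) (by omega)]; simp
    simp only [PySem.List.enumerate_nil, List.filter_nil, List.map_nil, List.length_nil,
      List.nil_append, Nat.cast_zero, chop, h0, splitSegs]
  | cons p ps ih =>
    have hmap :
        (((PySem.List.enumerate (p :: ps) 0).filter (fun ip => decide ("-DOCSTART-" ∈ ip.2.1))).map (fun ip => ip.1)) ++ [((p :: ps).length : Int)]
        = (if "-DOCSTART-" ∈ p.1 then [(0:Int)] else [])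
          ++ ((((PySem.List.enumerate ps 0).filter (fun ip => decide ("-DOCSTART-" ∈ ip.2.1))).map (fun ip => ip.1)) ++ [(ps.length : Int)]).map (· + 1) := by
      rw [PySem.List.enumerate_cons, enumerate_shift ps 0]
      by_cases hm : "-DOCSTART-" ∈ p.1 <;>
        simp [hm, List.filter_map, List.map_map, Function.comp_def]
    rw [hmap]
    have hnn : ∀ x ∈ (((PySem.List.enumerate ps 0).filter (fun ip => decide ("-DOCSTART-" ∈ ip.2.1))).map (fun ip => ip.1)) ++ [(ps.length : Int)], (0:Int) ≤ x := by
      intro x hx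
      simp only [List.mem_append, List.mem_singleton] at hx
      rcases hx with h | h
      · exact cuts_nonneg ps x h
      · subst h; exact Int.natCast_nonneg _
    by_cases hm : "-DOCSTART-" ∈ p.1
    · simp only [hm, if_pos, List.singleton_append, chop]
      have hslice : PySem.List.slice (p :: ps) (some (-1+1)) (some 0) = [] := by
        rw [PySem.List.slice_toNat _ (by omega) (by omega)]; simp
      have hch := chop_shift p ps (-1) _ (by omega) hnn
      norm_num at hch
      rw [hslice]
      simp only [List.map_append, List.map_map, List.map_cons, List.map_nil]
      rw [hch, ih]
      simp [splitSegs, hm]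
    · simp only [hm, if_neg, not_false_iff, List.nil_append]
      rcases hb : (((PySem.List.enumerate ps 0).filter (fun ip => decide ("-DOCSTART-" ∈ ip.2.1))).map (fun ip => ip.1)) ++ [(ps.length : Int)] with _ | ⟨b, rest⟩
      · exact absurd hb (by simp)
      rw [hb] at hnn
      have hbnn : (0:Int) ≤ b := hnn b (by simp)
      simp only [List.map_cons, chop]
      rw [show (-1:Int) + 1 = 0 from by norm_num, slice_zero_cons _ _ _ hbnn,
          chop_shift p ps b rest (by omega) (fun x hx => hnn x (by simp [hx]))]
      have hps : splitSegs ps = PySem.List.slice ps (some 0) (some b) :: chop ps b rest := by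
        rw [← ih, hb]
        simp only [chop]
        rw [show (-1:Int) + 1 = 0 from by norm_num]
      simp only [splitSegs, if_neg hm, hps, List.modifyHead_cons]

theorem zipConsec_chop (l : List (List String × List String)) (lo : Int) (bs : List Int) :
    ((lo :: bs).zip bs).map (fun lh => PySem.List.slice l (some (lh.1 + 1)) (some lh.2)) = chop l lo bs := by
  induction bs generalizing lo with
  | nil => simp [chop]
  | cons hi rest ih => simp [chop, ih hi]

theorem modifyHead_modifyHead {α : Type} (l : List α) (f g : α → α) :
    (l.modifyHead g).modifyHead f = l.modifyHead (fun a => f (g a)) := by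
  cases l <;> simp

theorem map_modifyHead {α β : Type} (f : α → β) (g : α → α) (h : β → β)
    (hc : ∀ a, f (g a) = h (f a)) (l : List α) :
    (l.modifyHead g).map f = (l.map f).modifyHead h := by
  cases l <;> simp [hc]

theorem modifyHead_id' {α : Type} (l : List α) :
    l.modifyHead (fun x => x) = l := by
  cases l <;> simp

theorem A_char (l : List (List String × List String))
    (D T : List (List (List String))) (d t : List (List String)) :
    (let st := l.foldl
      (fun (st : List (List (List String)) × List (List (List String)) × List (List String) × List (List String)) p =>
        if "-DOCSTART-" ∈ p.1 then
          (st.1 ++ [st.2.2.1], st.2.1 ++ [st.2.2.2], [], [])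
        else
          (st.1, st.2.1, st.2.2.1 ++ [p.1], st.2.2.2 ++ [p.2]))
      (D, T, d, t);
     (st.1 ++ [st.2.2.1], st.2.1 ++ [st.2.2.2]))
    = (D ++ ((splitSegs l).map (fun seg => seg.map (fun p => p.1))).modifyHead (d ++ ·),
       T ++ ((splitSegs l).map (fun seg => seg.map (fun p => p.2))).modifyHead (t ++ ·)) := by
  induction l generalizing D T d t with
  | nil => simp [splitSegs]
  | cons p ps ih =>
    simp only [List.foldl_cons]
    by_cases hm : "-DOCSTART-" ∈ p.1
    · simp only [if_pos hm]
      rw [ih (D ++ [d]) (T ++ [t]) [] []]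
      simp [splitSegs, hm, modifyHead_id']
    · simp only [if_neg hm]
      rw [ih D T (d ++ [p.1]) (t ++ [p.2])]
      simp only [splitSegs, if_neg hm]
      rw [map_modifyHead (fun seg => seg.map (fun p => p.1)) (p :: ·) (p.1 :: ·) (by intro a; simp),
          map_modifyHead (fun seg => seg.map (fun p => p.2)) (p :: ·) (p.2 :: ·) (by intro a; simp),
          modifyHead_modifyHead, modifyHead_modifyHead]
      simp

-- ===== VERDICT (by name: the statement is the Claim_ definition above) =====
theorem convert_to_document_spec : Claim_equal_convert_to_document := by
  intro sentences tags _
  unfold Spec_convert_to_document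
  have hA := A_char (sentences.zip tags) [] [] [] []
  simp only [List.nil_append, modifyHead_id'] at hA
  show (let st := (sentences.zip tags).foldl _ ([], [], [], []); (st.1 ++ [st.2.2.1], st.2.1 ++ [st.2.2.2])) = _
  rw [hA]
  simp only [convert_to_document_alt, List.tail_cons]
  rw [zipConsec_chop, chop_eq_splitSegs]
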